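-- pv_equiv track=rewrite | github.com/cmpark225/algorithm | codewars/sum_of_pairs.py | sum_pairs1
-- ===== SOURCE A (Python) =====
-- def sum_pairs1(ints, s):
--     res = []
--     for i in range(len(ints)):
--         for j in range(i+1, len(ints)):
--             if res and abs(res[0]-res[1]) <= abs(i-j):
--                 break;
--             if ints[i]+ints[j] == s :
--                 res = [i, j]
--     return [ints[res[0]], ints[res[1]]] if res else None
-- ===== SOURCE B (Python) =====
-- def sum_pairs1(ints, s):
--     # One pass: dict of each value's most recent index; keep the closest pair seen.
--     last = {}
--     best = None  # (i, j) with minimal j - i, earliest such pair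
--     for j, v in enumerate(ints):
--         i = last.get(s - v)
--         if i is not None and (best is None or j - i < best[1] - best[0]):
--             best = (i, j)
--             if j - i == 1:
--                 break
--         last[v] = j
--     return [ints[best[0]], ints[best[1]]] if best is not None else None
-- ===== Notes on version B (the rewrite author's own statement) =====
-- stated objective: faster
-- what changed: Replaced the O(n^2) nested index scan (with its break-based pruning) by a single pass that keeps a dict of each value's most recent index and tracks the closest pair found so far.
import Mathlib
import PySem

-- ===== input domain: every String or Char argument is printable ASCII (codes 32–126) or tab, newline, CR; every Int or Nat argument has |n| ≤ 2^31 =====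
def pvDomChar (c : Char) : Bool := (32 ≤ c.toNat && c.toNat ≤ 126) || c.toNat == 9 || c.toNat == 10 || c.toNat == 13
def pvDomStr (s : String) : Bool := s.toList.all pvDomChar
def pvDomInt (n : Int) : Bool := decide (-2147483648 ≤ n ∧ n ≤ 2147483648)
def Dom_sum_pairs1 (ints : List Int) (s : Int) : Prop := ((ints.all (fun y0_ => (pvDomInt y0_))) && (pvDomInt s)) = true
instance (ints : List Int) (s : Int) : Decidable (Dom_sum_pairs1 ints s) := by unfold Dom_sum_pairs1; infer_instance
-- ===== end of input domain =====

-- B replaces A's O(n^2) nested index scan by a single pass with a dict of each value's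
-- most recent index, tracking the closest pair; same return value everywhere (A is total).

-- ===== PORT A =====
-- inner loop: 'for j in range(i+1, len(ints))' with its break; res = none encodes res == []
def sumPairs1Inner (ints : List Int) (s i : Int) (js : List Int)
    (res : Option (Int × Int)) : Option (Int × Int) :=
  match js with
  | [] => res
  | j :: rest =>
    match res with
    | some (a, b) =>
      if |a - b| ≤ |i - j| then some (a, b)   -- 'if res and abs(res[0]-res[1]) <= abs(i-j): break'
      else sumPairs1Inner ints s i rest
        (if PySem.List.pyGetD ints i 0 + PySem.List.pyGetD ints j 0 = s then some (i, j) else some (a, b))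
    | none =>
      sumPairs1Inner ints s i rest
        (if PySem.List.pyGetD ints i 0 + PySem.List.pyGetD ints j 0 = s then some (i, j) else none)

-- outer loop: 'for i in range(len(ints))'
def sumPairs1Outer (ints : List Int) (s : Int) (is_ : List Int)
    (res : Option (Int × Int)) : Option (Int × Int) :=
  match is_ with
  | [] => res
  | i :: rest =>
    sumPairs1Outer ints s rest (sumPairs1Inner ints s i (PySem.List.pyRange (i + 1) ints.length 1) res)

def sum_pairs1 (ints : List Int) (s : Int) : Option (List Int) :=
  match sumPairs1Outer ints s (PySem.List.pyRange 0 ints.length 1) none with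
  | some (a, b) => some [PySem.List.pyGetD ints a 0, PySem.List.pyGetD ints b 0]
  | none => none

-- ===== PORT B =====
-- single pass over enumerate(ints); 'last' maps a value to its most recent index,
-- 'best' is the closest pair (i, j) found so far; break as soon as j - i == 1
def sumPairs1Loop (ints : List Int) (s : Int) (items : List (Int × Int))
    (last : PySem.Dict Int Int) (best : Option (Int × Int)) : Option (Int × Int) :=
  match items with
  | [] => best
  | (j, v) :: rest =>
    match last.get? (s - v) with
    | some i =>
      match best with
      | none =>
        if j - i = 1 then some (i, j)
        else sumPairs1Loop ints s rest (last.insert v j) (some (i, j))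
      | some (a, b) =>
        if j - i < b - a then
          if j - i = 1 then some (i, j)
          else sumPairs1Loop ints s rest (last.insert v j) (some (i, j))
        else sumPairs1Loop ints s rest (last.insert v j) (some (a, b))
    | none => sumPairs1Loop ints s rest (last.insert v j) best

def sum_pairs1_alt (ints : List Int) (s : Int) : Option (List Int) :=
  match sumPairs1Loop ints s (PySem.List.enumerate ints 0) PySem.Dict.empty none with
  | some (a, b) => some [PySem.List.pyGetD ints a 0, PySem.List.pyGetD ints b 0]
  | none => none

-- ===== PRECONDITION & SPEC =====
def Spec_sum_pairs1 (ints : List Int) (s : Int) (out : Option (List Int)) : Prop := out = sum_pairs1_alt ints s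
instance (ints : List Int) (s : Int) (out : Option (List Int)) : Decidable (Spec_sum_pairs1 ints s out) := by unfold Spec_sum_pairs1; infer_instance

-- ===== CLAIM (what is proved, stated in full; the proofs are below) =====
def Claim_equal_sum_pairs1 : Prop := ∀ (ints : List Int) (s : Int), Dom_sum_pairs1 ints s → Spec_sum_pairs1 ints s (sum_pairs1 ints s)

-- ===== LEMMAS AND PROOFS =====

-- (i, j) is a valid pair of indices whose values sum to s
def Good (ints : List Int) (s i j : Int) : Prop :=
  0 ≤ i ∧ i < j ∧ j < ints.length ∧
    PySem.List.pyGetD ints i 0 + PySem.List.pyGetD ints j 0 = s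

-- the order both programs minimise: distance first, then left index
def KeyLE (p q : Int × Int) : Prop :=
  p.2 - p.1 < q.2 - q.1 ∨ (p.2 - p.1 = q.2 - q.1 ∧ p.1 ≤ q.1)

-- res is the KeyLE-minimum of the set S (none iff S is empty)
def MinOf (S : Int → Int → Prop) : Option (Int × Int) → Prop
  | none => ∀ i j, ¬ S i j
  | some (a, b) => S a b ∧ ∀ i j, S i j → KeyLE (a, b) (i, j)

lemma minOf_congr {S S' : Int → Int → Prop} (h : ∀ i j, S i j ↔ S' i j) :
    ∀ {r}, MinOf S r → MinOf S' r := by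
  intro r hr
  match r with
  | none => intro i j hij; exact hr i j ((h i j).mpr hij)
  | some (a, b) =>
    exact ⟨(h a b).mp hr.1, fun i j hij => hr.2 i j ((h i j).mpr hij)⟩

lemma minOf_unique {S : Int → Int → Prop} {r1 r2 : Option (Int × Int)}
    (h1 : MinOf S r1) (h2 : MinOf S r2) : r1 = r2 := by
  match r1, r2 with
  | none, none => rfl
  | none, some (a, b) => exact absurd h2.1 (h1 a b)
  | some (a, b), none => exact absurd h1.1 (h2 a b)
  | some (a, b), some (c, d) =>
    have k1 := h1.2 c d h2.1
    have k2 := h2.2 a b h1.1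
    simp only [KeyLE] at k1 k2
    have : a = c ∧ b = d := by omega
    simp [this.1, this.2]

-- the part of the pair space A has fully processed: rows below I, and row I up to column J
def RowLT (ints : List Int) (s I J i j : Int) : Prop :=
  Good ints s i j ∧ (i < I ∨ (i = I ∧ j < J))

def BelowRow (ints : List Int) (s I i j : Int) : Prop := Good ints s i j ∧ i < I

lemma inner_inv (ints : List Int) (s i : Int) (h0i : 0 ≤ i) :
    ∀ (m : Nat) (J : Int) (res : Option (Int × Int)), i < J →
      (ints.length : Int) ≤ J + m →
      MinOf (RowLT ints s i J) res →
      MinOf (fun i' j' => Good ints s i' j' ∧ i' ≤ i)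
        (sumPairs1Inner ints s i (PySem.List.pyRange J ints.length 1) res) := by
  intro m
  induction m with
  | zero =>
    intro J res hiJ hle hres
    rw [PySem.List.pyRange_one_eq_nil (by omega)]
    show MinOf _ res
    refine minOf_congr (fun i' j' => ⟨fun h => ⟨h.1, by rcases h.2 with h2 | h2 <;> omega⟩,
      fun h => ⟨h.1, ?_⟩⟩) hres
    obtain ⟨⟨_, hg1, hg2, _⟩, hile⟩ := h
    omega
  | succ m ihm =>
    intro J res hiJ hle hres
    by_cases hn : (ints.length : Int) ≤ J
    · rw [PySem.List.pyRange_one_eq_nil (by omega)]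
      show MinOf _ res
      refine minOf_congr (fun i' j' => ⟨fun h => ⟨h.1, by rcases h.2 with h2 | h2 <;> omega⟩,
        fun h => ⟨h.1, ?_⟩⟩) hres
      obtain ⟨⟨_, hg1, hg2, _⟩, hile⟩ := h
      omega
    · rw [PySem.List.pyRange_one_cons (by omega)]
      rcases res with _ | ⟨a, b⟩
      · -- res is empty: row i up to J holds no pair
        have hempty : ∀ i' j', ¬ RowLT ints s i J i' j' := hres
        simp only [sumPairs1Inner]
        split_ifs with hs
        · -- ints[i] + ints[J] == s: record (i, J)
          apply ihm (J + 1) (some (i, J)) (by omega) (by omega)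
          refine ⟨⟨⟨h0i, by omega, by omega, hs⟩, Or.inr ⟨rfl, by omega⟩⟩, fun i' j' hr => ?_⟩
          by_cases hc : i' < i ∨ (i' = i ∧ j' < J)
          · exact absurd ⟨hr.1, hc⟩ (hempty i' j')
          · -- only the new pair (i, J) itself is in range
            have : i' = i ∧ j' = J := by
              rcases hr.2 with h2 | h2
              · exact absurd (Or.inl h2) hc
              · refine ⟨h2.1, ?_⟩
                by_contra hne
                exact hc (Or.inr ⟨h2.1, by omega⟩)
            unfold KeyLE
            omega
        · apply ihm (J + 1) none (by omega) (by omega)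
          intro i' j' hr
          rcases hr.2 with h2 | h2
          · exact hempty i' j' ⟨hr.1, Or.inl h2⟩
          · by_cases hj : j' = J
            · -- (i, J) would have to sum to s, contradicting the failed test
              obtain ⟨_, _, _, hg3⟩ := hr.1
              rw [h2.1, hj] at hg3
              exact hs hg3
            · exact hempty i' j' ⟨hr.1, Or.inr ⟨h2.1, by omega⟩⟩
      · obtain ⟨⟨hGab, hpos⟩, hmin⟩ := hres
        obtain ⟨ha0, hab, hbn, hsum⟩ := hGab
        have habs1 : |a - b| = b - a := by rw [abs_sub_comm]; exact abs_of_nonneg (by omega)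
        have habs2 : |i - J| = J - i := by rw [abs_sub_comm]; exact abs_of_nonneg (by omega)
        simp only [sumPairs1Inner]
        split_ifs with hbr hs
        · -- break: everything left in this row is at distance ≥ b - a
          rw [habs1, habs2] at hbr
          refine ⟨⟨⟨ha0, hab, hbn, hsum⟩, by omega⟩, fun i' j' hg => ?_⟩
          by_cases hc : i' < i ∨ (i' = i ∧ j' < J)
          · exact hmin i' j' ⟨hg.1, hc⟩
          · obtain ⟨⟨_, hg1, _, _⟩, hile⟩ := hg
            unfold KeyLE
            omega
        · -- no break (b - a > J - i), match: (i, J) is a strict improvement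
          rw [habs1, habs2] at hbr
          apply ihm (J + 1) (some (i, J)) (by omega) (by omega)
          refine ⟨⟨⟨h0i, by omega, by omega, hs⟩, Or.inr ⟨rfl, by omega⟩⟩, fun i' j' hr => ?_⟩
          by_cases hc : i' < i ∨ (i' = i ∧ j' < J)
          · have hk := hmin i' j' ⟨hr.1, hc⟩
            obtain ⟨_, hg1, _, _⟩ := hr.1
            unfold KeyLE at hk ⊢
            omega
          · have : i' = i ∧ j' = J := by
              rcases hr.2 with h2 | h2
              · exact absurd (Or.inl h2) hc
              · refine ⟨h2.1, ?_⟩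
                by_contra hne
                exact hc (Or.inr ⟨h2.1, by omega⟩)
            unfold KeyLE
            omega
        · -- no break, no match: nothing changes
          rw [habs1, habs2] at hbr
          apply ihm (J + 1) (some (a, b)) (by omega) (by omega)
          refine ⟨⟨⟨ha0, hab, hbn, hsum⟩, by rcases hpos with h2 | h2 <;> [exact Or.inl h2; exact Or.inr ⟨h2.1, by omega⟩]⟩,
            fun i' j' hr => ?_⟩
          by_cases hc : i' < i ∨ (i' = i ∧ j' < J)
          · exact hmin i' j' ⟨hr.1, hc⟩
          · have : i' = i ∧ j' = J := by
              rcases hr.2 with h2 | h2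
              · exact absurd (Or.inl h2) hc
              · refine ⟨h2.1, ?_⟩
                by_contra hne
                exact hc (Or.inr ⟨h2.1, by omega⟩)
            obtain ⟨_, _, _, hg3⟩ := hr.1
            rw [this.1, this.2] at hg3
            exact absurd hg3 hs

lemma outer_inv (ints : List Int) (s : Int) :
    ∀ (m : Nat) (I : Int) (res : Option (Int × Int)), 0 ≤ I →
      (ints.length : Int) ≤ I + m →
      MinOf (BelowRow ints s I) res →
      MinOf (Good ints s) (sumPairs1Outer ints s (PySem.List.pyRange I ints.length 1) res) := by
  intro m
  induction m with
  | zero =>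
    intro I res h0I hle hres
    rw [PySem.List.pyRange_one_eq_nil (by omega)]
    show MinOf _ res
    refine minOf_congr (fun i j => ⟨fun h => h.1, fun h => ⟨h, ?_⟩⟩) hres
    obtain ⟨_, hg1, hg2, _⟩ := h
    omega
  | succ m ihm =>
    intro I res h0I hle hres
    by_cases hn : (ints.length : Int) ≤ I
    · rw [PySem.List.pyRange_one_eq_nil (by omega)]
      show MinOf _ res
      refine minOf_congr (fun i j => ⟨fun h => h.1, fun h => ⟨h, ?_⟩⟩) hres
      obtain ⟨_, hg1, hg2, _⟩ := h
      omega
    · rw [PySem.List.pyRange_one_cons (by omega)]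
      simp only [sumPairs1Outer]
      apply ihm (I + 1) _ (by omega) (by omega)
      have hpre : MinOf (RowLT ints s I (I + 1)) res := by
        refine minOf_congr (fun i j => ⟨fun h => ⟨h.1, Or.inl h.2⟩, fun h => ⟨h.1, ?_⟩⟩) hres
        obtain ⟨⟨_, hg1, _, _⟩, hpos⟩ := h
        omega
      have hpost := inner_inv ints s I h0I m (I + 1) res (by omega) (by omega) hpre
      refine minOf_congr (fun i j => ⟨fun h => ⟨h.1, by have := h.2; omega⟩,
        fun h => ⟨h.1, by have := h.2; omega⟩⟩) hpost

-- last maps v to the most recent index < J holding value v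
def LastInv (ints : List Int) (J : Int) (last : PySem.Dict Int Int) : Prop :=
  ∀ v i, last.get? v = some i ↔
    (0 ≤ i ∧ i < J ∧ PySem.List.pyGetD ints i 0 = v ∧
      ∀ k, i < k → k < J → PySem.List.pyGetD ints k 0 ≠ v)

def ColLT (ints : List Int) (s J i j : Int) : Prop := Good ints s i j ∧ j < J

lemma lastInv_step {ints : List Int} {J : Int} {last : PySem.Dict Int Int} {v : Int}
    (h : LastInv ints J last) (hJ : 0 ≤ J) (hv : PySem.List.pyGetD ints J 0 = v) :
    LastInv ints (J + 1) (last.insert v J) := by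
  intro v' i
  rw [PySem.Dict.get?_insert]
  by_cases hvv : v' = v
  · subst hvv
    rw [if_pos rfl]
    constructor
    · rintro ⟨rfl⟩
      exact ⟨hJ, by omega, hv, fun k hk1 hk2 _ => by omega⟩
    · rintro ⟨hi0, hiJ, hiv, hmax⟩
      by_cases hiJ' : i = J
      · simp [hiJ']
      · exact absurd hv (hmax J (by omega) (by omega))
  · rw [if_neg hvv]
    rw [h v' i]
    constructor
    · rintro ⟨hi0, hiJ, hiv, hmax⟩
      refine ⟨hi0, by omega, hiv, fun k hk1 hk2 hkv => ?_⟩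
      by_cases hkJ : k = J
      · exact hvv (by rw [← hkv, hkJ, hv])
      · exact hmax k hk1 (by omega) hkv
    · rintro ⟨hi0, hiJ, hiv, hmax⟩
      have hiJ2 : i < J := by
        by_contra hge
        have hiJ3 : i = J := by omega
        exact hvv (by rw [← hiv, hiJ3, hv])
      exact ⟨hi0, hiJ2, hiv, fun k hk1 hk2 hkv => hmax k hk1 (by omega) hkv⟩

lemma lastInv_none {ints : List Int} {J : Int} {last : PySem.Dict Int Int} {v : Int}
    (h : LastInv ints J last) (hn : last.get? v = none) (hJ : 0 ≤ J) :
    ∀ i, ¬ (0 ≤ i ∧ i < J ∧ PySem.List.pyGetD ints i 0 = v) := by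
  rintro i ⟨hi0, hiJ, hiv⟩
  have hPi : (i.toNat : Int) < J ∧ PySem.List.pyGetD ints (i.toNat : Int) 0 = v := by
    rw [Int.toNat_of_nonneg hi0]; exact ⟨hiJ, hiv⟩
  have hspec := Nat.findGreatest_spec
    (P := fun k : Nat => (k : Int) < J ∧ PySem.List.pyGetD ints (k : Int) 0 = v)
    (m := i.toNat) (n := J.toNat) (by omega) hPi
  set m := Nat.findGreatest (fun k : Nat => (k : Int) < J ∧ PySem.List.pyGetD ints (k : Int) 0 = v) J.toNat with hm
  have : last.get? v = some (m : Int) := by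
    rw [h v (m : Int)]
    refine ⟨by omega, hspec.1, hspec.2, fun k hk1 hk2 hkv => ?_⟩
    have hk0 : (0:Int) ≤ k := by omega
    have hgr := Nat.findGreatest_is_greatest
      (P := fun k : Nat => (k : Int) < J ∧ PySem.List.pyGetD ints (k : Int) 0 = v)
      (k := k.toNat) (n := J.toNat) (by omega) (by omega)
    apply hgr
    show (k.toNat : Int) < J ∧ PySem.List.pyGetD ints (k.toNat : Int) 0 = v
    rw [Int.toNat_of_nonneg hk0]
    exact ⟨by omega, hkv⟩
  rw [hn] at this
  exact absurd this (by simp)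

lemma loop_inv (ints : List Int) (s : Int) :
    ∀ (l : List Int) (J : Int) (last : PySem.Dict Int Int) (best : Option (Int × Int)),
      0 ≤ J → List.drop J.toNat ints = l →
      LastInv ints J last → MinOf (ColLT ints s J) best →
      MinOf (Good ints s) (sumPairs1Loop ints s (PySem.List.enumerate l J) last best) := by
  intro l
  induction l with
  | nil =>
    intro J last best hJ hdrop hlast hbest
    have hlen : ints.length ≤ J.toNat := by
      have := congrArg List.length hdrop
      simp only [List.length_drop, List.length_nil] at this
      omega
    rw [PySem.List.enumerate_nil]
    show MinOf (Good ints s) best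
    refine minOf_congr (fun i j => ⟨fun h => h.1, fun h => ⟨h, ?_⟩⟩) hbest
    obtain ⟨_, _, h3, _⟩ := h
    omega
  | cons v rest ih =>
    intro J last best hJ hdrop hlast hbest
    have hJn : J.toNat < ints.length := by
      have := congrArg List.length hdrop
      simp only [List.length_drop, List.length_cons] at this
      omega
    have hv : PySem.List.pyGetD ints J 0 = v := by
      have h0 : ints[J.toNat]? = some v := by
        have := congrArg (fun t => t[0]?) hdrop
        simpa [List.getElem?_drop] using this
      rw [show J = ((J.toNat : Nat) : Int) by omega, PySem.List.pyGetD_natCast]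
      simp [List.getD_eq_getElem?_getD, h0]
    have hdrop' : List.drop (J + 1).toNat ints = rest := by
      have h1 : (J + 1).toNat = J.toNat + 1 := by omega
      rw [h1, ← List.drop_drop, hdrop, List.drop_one, List.tail_cons]
    rw [PySem.List.enumerate_cons]
    cases hlook : last.get? (s - v) with
    | none =>
      have hnone := lastInv_none hlast hlook hJ
      simp only [sumPairs1Loop, hlook]
      apply ih (J + 1) (last.insert v J) best (by omega) hdrop' (lastInv_step hlast hJ hv)
      refine minOf_congr (fun i' j' => ⟨fun h => ⟨h.1, by have := h.2; omega⟩, fun h => ⟨h.1, ?_⟩⟩) hbest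
      -- the new column J holds no pair: no earlier index has value s - v
      obtain ⟨⟨hg0, hg1, hg2, hg3⟩, hj⟩ := h
      by_contra hge
      have hjJ : j' = J := by omega
      subst hjJ
      rw [hv] at hg3
      exact hnone i' ⟨hg0, hg1, by omega⟩
    | some i =>
      obtain ⟨hi0, hiJ, hival, himax⟩ := (hlast (s - v) i).mp hlook
      have hGoodiJ : Good ints s i J := ⟨hi0, hiJ, by omega, by rw [hival, hv]; ring⟩
      -- any pair in column J has left index ≤ i (i is the last occurrence of s - v before J)
      have hcolmax : ∀ i', Good ints s i' J → i' ≤ i := by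
        intro i' hg
        obtain ⟨hg0, hg1, hg2, hg3⟩ := hg
        rw [hv] at hg3
        by_contra hgt
        exact himax i' (by omega) hg1 (by omega)
      cases best with
      | none =>
        have hempty : ∀ i' j', ¬ ColLT ints s J i' j' := hbest
        simp only [sumPairs1Loop, hlook]
        split_ifs with hd1
        · -- break: (i, J) at distance 1 is the global minimum
          refine ⟨hGoodiJ, fun i' j' hg => ?_⟩
          rcases lt_trichotomy j' J with hlt | heq | hgt
          · exact absurd ⟨hg, hlt⟩ (hempty i' j')
          · subst heq
            have := hcolmax i' hg
            obtain ⟨_, hg1, _, _⟩ := hg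
            unfold KeyLE
            omega
          · obtain ⟨_, hg1, _, _⟩ := hg
            unfold KeyLE
            omega
        · apply ih (J + 1) (last.insert v J) (some (i, J)) (by omega) hdrop' (lastInv_step hlast hJ hv)
          refine ⟨⟨hGoodiJ, by omega⟩, fun i' j' hc => ?_⟩
          obtain ⟨hg, hjlt⟩ := hc
          rcases lt_trichotomy j' J with hlt | heq | hgt
          · exact absurd ⟨hg, hlt⟩ (hempty i' j')
          · subst heq
            have := hcolmax i' hg
            obtain ⟨_, hg1, _, _⟩ := hg
            unfold KeyLE
            omega
          · omega
      | some ab =>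
        obtain ⟨a, b⟩ := ab
        obtain ⟨⟨hGab, hbJ⟩, hmin⟩ := hbest
        simp only [sumPairs1Loop, hlook]
        split_ifs with himp hd1
        · -- strict improvement and distance 1: global minimum
          refine ⟨hGoodiJ, fun i' j' hg => ?_⟩
          rcases lt_trichotomy j' J with hlt | heq | hgt
          · have hk := hmin i' j' ⟨hg, hlt⟩
            obtain ⟨_, hg1, _, _⟩ := hg
            unfold KeyLE at hk ⊢
            omega
          · subst heq
            have := hcolmax i' hg
            obtain ⟨_, hg1, _, _⟩ := hg
            unfold KeyLE
            omega
          · obtain ⟨_, hg1, _, _⟩ := hg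
            unfold KeyLE
            omega
        · -- strict improvement: recurse with (i, J) as new best
          apply ih (J + 1) (last.insert v J) (some (i, J)) (by omega) hdrop' (lastInv_step hlast hJ hv)
          refine ⟨⟨hGoodiJ, by omega⟩, fun i' j' hc => ?_⟩
          obtain ⟨hg, hjlt⟩ := hc
          rcases lt_trichotomy j' J with hlt | heq | hgt
          · have hk := hmin i' j' ⟨hg, hlt⟩
            obtain ⟨_, hg1, _, _⟩ := hg
            unfold KeyLE at hk ⊢
            omega
          · subst heq
            have := hcolmax i' hg
            obtain ⟨_, hg1, _, _⟩ := hg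
            unfold KeyLE
            omega
          · omega
        · -- no improvement: the old best still dominates column J
          apply ih (J + 1) (last.insert v J) (some (a, b)) (by omega) hdrop' (lastInv_step hlast hJ hv)
          refine ⟨⟨hGab, by omega⟩, fun i' j' hc => ?_⟩
          obtain ⟨hg, hjlt⟩ := hc
          rcases lt_trichotomy j' J with hlt | heq | hgt
          · exact hmin i' j' ⟨hg, hlt⟩
          · subst heq
            have := hcolmax i' hg
            obtain ⟨_, hg1, _, _⟩ := hg
            unfold KeyLE
            omega
          · omega

-- ===== VERDICT (by name: the statement is the Claim_ definition above) =====
theorem sum_pairs1_spec : Claim_equal_sum_pairs1 := by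
  intro ints s _
  unfold Spec_sum_pairs1 sum_pairs1 sum_pairs1_alt
  have hA : MinOf (Good ints s) (sumPairs1Outer ints s (PySem.List.pyRange 0 ints.length 1) none) := by
    refine outer_inv ints s ints.length 0 none le_rfl (by omega) ?_
    intro i j hij
    exact absurd hij.2 (by have := hij.1.1; omega)
  have hB : MinOf (Good ints s) (sumPairs1Loop ints s (PySem.List.enumerate ints 0) PySem.Dict.empty none) := by
    refine loop_inv ints s ints 0 PySem.Dict.empty none le_rfl rfl ?_ ?_
    · intro v i
      constructor
      · intro hsome; simp [PySem.Dict.get?_empty] at hsome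
      · intro hrhs; omega
    · intro i j hij
      obtain ⟨⟨h1, h2, _, _⟩, h4⟩ := hij
      omega
  rw [minOf_unique hA hB]
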